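-- pv_equiv track=rewrite | github.com/Hemilt0n/wiztree-auto | wiztree_auto/pipeline.py | build_hot_path_series
-- ===== SOURCE A (Python) =====
-- def build_hot_path_series(
--     path_rows: list[dict[str, str]],
--     scan_dates: list[str],
--     selected_paths: list[str],
-- ) -> dict[str, list[int]]:
--     daily_latest: dict[tuple[str, str], dict[str, str]] = {}
--     for row in path_rows:
--         key = (row["scan_date"], row["path"])
--         current = daily_latest.get(key)
--         if current is None or row["snapshot_ts"] > current["snapshot_ts"]:
--             daily_latest[key] = row
--
--     series: dict[str, list[int]] = {}
--     for path in selected_paths: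
--         series[path] = [
--             int(daily_latest[(scan_date, path)]["allocated_bytes"])
--             if (scan_date, path) in daily_latest
--             else 0
--             for scan_date in scan_dates
--         ]
--     return series
-- ===== SOURCE B (Python) =====
-- def _value_at(daily_latest, scan_date, path):
--     row = daily_latest.get((scan_date, path))
--     return int(row["allocated_bytes"]) if row is not None else 0
--
--
-- def build_hot_path_series(
--     path_rows: list[dict[str, str]],
--     scan_dates: list[str],
--     selected_paths: list[str],
-- ) -> dict[str, list[int]]:
--     # Stable descending sort by snapshot_ts, then first-wins dedup per (scan_date, path):
--     # reproduces A's "first row among equal max timestamps" choice.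
--     daily_latest: dict[tuple[str, str], dict[str, str]] = {}
--     for row in sorted(path_rows, key=lambda r: r["snapshot_ts"], reverse=True):
--         key = (row["scan_date"], row["path"])
--         if key not in daily_latest:
--             daily_latest[key] = row
--     return {
--         path: [_value_at(daily_latest, scan_date, path) for scan_date in scan_dates]
--         for path in selected_paths
--     }
-- ===== Notes on version B (the rewrite author's own statement) =====
-- stated objective: alternative
-- what changed: Replaces the single-pass running-max scan that keeps the latest row per (scan_date, path) with a stable descending sort by snapshot_ts followed by a first-wins dedup pass; the series table is then built as a dict comprehension from lookups.
import Mathlib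
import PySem

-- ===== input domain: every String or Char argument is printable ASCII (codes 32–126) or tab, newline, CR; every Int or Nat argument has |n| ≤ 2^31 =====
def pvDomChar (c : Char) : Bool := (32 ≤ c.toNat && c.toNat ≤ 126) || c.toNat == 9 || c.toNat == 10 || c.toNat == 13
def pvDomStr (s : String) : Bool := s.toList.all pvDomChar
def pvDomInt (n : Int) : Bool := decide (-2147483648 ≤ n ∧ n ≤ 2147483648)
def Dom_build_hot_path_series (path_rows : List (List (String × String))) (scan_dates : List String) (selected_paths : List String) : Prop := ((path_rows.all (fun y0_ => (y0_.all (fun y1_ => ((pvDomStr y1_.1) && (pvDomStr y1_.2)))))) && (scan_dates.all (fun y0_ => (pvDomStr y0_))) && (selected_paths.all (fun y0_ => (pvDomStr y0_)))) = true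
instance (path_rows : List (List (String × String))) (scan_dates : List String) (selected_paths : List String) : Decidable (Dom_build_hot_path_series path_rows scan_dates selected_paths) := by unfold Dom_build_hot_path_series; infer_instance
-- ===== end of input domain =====

-- B replaces A's running-max scan with a stable descending sort by snapshot_ts plus a
-- first-wins dedup pass (an alternative decomposition of the same task, not claimed faster).


-- ===== PORT A =====
-- row["k"]: first-match association-list lookup (exact under the dict convention);
-- the "" default is only reachable outside Pre_ (a missing key is a KeyError in Python).
def pvRowGet (row : List (String × String)) (k : String) : String :=
  (List.lookup k row).getD ""

def pvKey (row : List (String × String)) : String × String :=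
  (pvRowGet row "scan_date", pvRowGet row "path")

def pvTs (row : List (String × String)) : String :=
  pvRowGet row "snapshot_ts"

-- loop body of A's first pass: keep the row with the strictly larger snapshot_ts
def pvStepLatest (d : PySem.Dict (String × String) (List (String × String))) (row : List (String × String)) : PySem.Dict (String × String) (List (String × String)) :=
  match d.get? (pvKey row) with
  | none => d.insert (pvKey row) row
  | some current => if pvTs current < pvTs row then d.insert (pvKey row) row else d

def build_hot_path_series (path_rows : List (List (String × String))) (scan_dates : List String) (selected_paths : List String) : List (String × List Int) :=
  let daily_latest := path_rows.foldl pvStepLatest PySem.Dict.empty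
  (selected_paths.foldl (fun s path =>
      s.insert path (scan_dates.map (fun scan_date =>
        if daily_latest.contains (scan_date, path) then
          -- int(...): the .getD 0 default is only reachable outside Pre_ (ValueError)
          (PySem.Int.ofStr? (pvRowGet ((daily_latest.get? (scan_date, path)).getD []) "allocated_bytes")).getD 0
        else 0)))
    PySem.Dict.empty).items

-- ===== PORT B =====
-- loop body of B's first pass: first-wins dedup per (scan_date, path)
def pvStepDedup (d : PySem.Dict (String × String) (List (String × String))) (row : List (String × String)) : PySem.Dict (String × String) (List (String × String)) :=
  if d.contains (pvKey row) then d else d.insert (pvKey row) row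

def pvValueAt (daily_latest : PySem.Dict (String × String) (List (String × String))) (scan_date path : String) : Int :=
  match daily_latest.get? (scan_date, path) with
  | some row => (PySem.Int.ofStr? (pvRowGet row "allocated_bytes")).getD 0
  | none => 0

def build_hot_path_series_alt (path_rows : List (List (String × String))) (scan_dates : List String) (selected_paths : List String) : List (String × List Int) :=
  let daily_latest := (PySem.List.sorted path_rows (fun r => pvTs r) true).foldl pvStepDedup PySem.Dict.empty
  (selected_paths.foldl (fun s path =>
      s.insert path (scan_dates.map (fun scan_date => pvValueAt daily_latest scan_date path)))
    PySem.Dict.empty).items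

-- ===== PRECONDITION & SPEC =====
-- Pre_ = exactly the inputs on which the Python A returns: every row has the three keys
-- read in phase 1 (else KeyError), and every row that phase 2 actually reads — the
-- first-of-maximal-snapshot_ts row of a (scan_date, path) group whose date is in
-- scan_dates and whose path is in selected_paths — has an int-parsable allocated_bytes
-- value (else KeyError/ValueError from int(row["allocated_bytes"])).
def Pre_build_hot_path_series (path_rows : List (List (String × String))) (scan_dates : List String) (selected_paths : List String) : Prop :=
  (∀ row ∈ path_rows, (List.lookup "scan_date" row).isSome ∧ (List.lookup "path" row).isSome ∧ (List.lookup "snapshot_ts" row).isSome) ∧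
  (∀ i : Fin path_rows.length,
      (pvRowGet path_rows[i] "path" ∈ selected_paths ∧ pvRowGet path_rows[i] "scan_date" ∈ scan_dates ∧
       (∀ j : Fin path_rows.length, j < i → pvKey path_rows[j] = pvKey path_rows[i] → pvTs path_rows[j] < pvTs path_rows[i]) ∧
       (∀ j : Fin path_rows.length, i < j → pvKey path_rows[j] = pvKey path_rows[i] → ¬ pvTs path_rows[i] < pvTs path_rows[j])) →
      (PySem.Int.ofStr? (pvRowGet path_rows[i] "allocated_bytes")).isSome)
instance (path_rows : List (List (String × String))) (scan_dates : List String) (selected_paths : List String) : Decidable (Pre_build_hot_path_series path_rows scan_dates selected_paths) := by unfold Pre_build_hot_path_series; infer_instance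

def pvWitness_build_hot_path_series : (List (List (String × String))) × List String × List String :=
  ([[("scan_date", "2024-01-01"), ("path", "C:/a"), ("snapshot_ts", "10"), ("allocated_bytes", "7")]],
   ["2024-01-01", "2024-01-02"], ["C:/a", "C:/b"])

def Spec_build_hot_path_series (path_rows : List (List (String × String))) (scan_dates : List String) (selected_paths : List String) (out : List (String × List Int)) : Prop := out = build_hot_path_series_alt path_rows scan_dates selected_paths
instance (path_rows : List (List (String × String))) (scan_dates : List String) (selected_paths : List String) (out : List (String × List Int)) : Decidable (Spec_build_hot_path_series path_rows scan_dates selected_paths out) := by unfold Spec_build_hot_path_series; infer_instance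

-- ===== CLAIM (what is proved, stated in full; the proofs are below) =====
def Claim_equal_build_hot_path_series : Prop := ∀ (path_rows : List (List (String × String))) (scan_dates : List String) (selected_paths : List String), Dom_build_hot_path_series path_rows scan_dates selected_paths → Pre_build_hot_path_series path_rows scan_dates selected_paths → Spec_build_hot_path_series path_rows scan_dates selected_paths (build_hot_path_series path_rows scan_dates selected_paths)

-- ===== LEMMAS AND PROOFS =====

-- the effect of one pass of A's loop on a single key: a running "first max" fold
def gK (k : String × String) (acc : Option (List (String × String))) (r : List (String × String)) : Option (List (String × String)) :=
  if pvKey r = k then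
    (match acc with
     | none => some r
     | some c => if pvTs c < pvTs r then some r else acc)
  else acc

theorem stepLatest_get? (l : List (List (String × String))) (k : String × String) :
    ∀ d : PySem.Dict (String × String) (List (String × String)),
    (l.foldl pvStepLatest d).get? k = l.foldl (gK k) (d.get? k) := by
  induction l with
  | nil => intro d; rfl
  | cons r l ih =>
    intro d
    have hstep : (pvStepLatest d r).get? k = gK k (d.get? k) r := by
      by_cases h : pvKey r = k
      · subst h
        unfold pvStepLatest gK
        cases hd : d.get? (pvKey r) with
        | none => simp [PySem.Dict.get?_insert_self]
        | some c =>
          by_cases hlt : pvTs c < pvTs r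
          · simp [hlt, PySem.Dict.get?_insert_self]
          · simp [hlt, hd]
      · unfold pvStepLatest gK
        cases hd : d.get? (pvKey r) with
        | none =>
          rw [PySem.Dict.get?_insert_of_ne d r (Ne.symm h)]
          simp [h]
        | some c =>
          by_cases hlt : pvTs c < pvTs r
          · simp only [if_pos hlt]
            rw [PySem.Dict.get?_insert_of_ne d r (Ne.symm h)]
            simp [h]
          · simp [hlt, h]
    simp only [List.foldl_cons, ih, hstep]

theorem stepDedup_get? (s : List (List (String × String))) (k : String × String) :
    ∀ d : PySem.Dict (String × String) (List (String × String)),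
    (s.foldl pvStepDedup d).get? k = (d.get? k).or ((s.filter (fun r => decide (pvKey r = k))).head?) := by
  induction s with
  | nil => intro d; simp
  | cons r s ih =>
    intro d
    simp only [List.foldl_cons, ih]
    by_cases h : pvKey r = k
    · subst h
      by_cases hc : d.contains (pvKey r) = true
      · have hs : (d.get? (pvKey r)).isSome := by
          rw [← PySem.Dict.contains_eq_isSome_get?]; exact hc
        obtain ⟨v, hv⟩ := Option.isSome_iff_exists.mp hs
        simp [pvStepDedup, hc, hv]
      · have hn : d.get? (pvKey r) = none := by
          cases ho : d.get? (pvKey r) with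
          | none => rfl
          | some v => exact absurd (by rw [PySem.Dict.contains_eq_isSome_get?, ho]; rfl) hc
        simp [pvStepDedup, hc, hn, PySem.Dict.get?_insert_self]
    · have : (pvStepDedup d r).get? k = d.get? k := by
        unfold pvStepDedup
        by_cases hc : d.contains (pvKey r) = true
        · simp [hc]
        · simp only [hc, Bool.false_eq_true, not_false_iff, if_false]
          exact PySem.Dict.get?_insert_of_ne d r (Ne.symm h)
      simp [this, h]

-- inserting x into a list that is weakly decreasing in snapshot_ts: the head of the
-- filtered result is exactly one "first max" step applied to the old filtered head
theorem insertBy_filter_head (k : String × String) (x : List (String × String)) :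
    ∀ (s : List (List (String × String))), s.Pairwise (fun a b => pvTs b ≤ pvTs a) →
    ((PySem.List.insertBy (fun a b => decide (pvTs b < pvTs a)) x s).filter (fun r => decide (pvKey r = k))).head?
      = gK k ((s.filter (fun r => decide (pvKey r = k))).head?) x := by
  intro s
  induction s with
  | nil =>
    intro _
    by_cases hx : pvKey x = k <;> simp [PySem.List.insertBy, gK, hx]
  | cons y ys ih =>
    intro hp
    have hpy : ∀ c ∈ ys, pvTs c ≤ pvTs y := (List.pairwise_cons.mp hp).1
    have hpys := (List.pairwise_cons.mp hp).2
    by_cases hb : pvTs y < pvTs x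
    · -- x is inserted in front of y
      simp only [PySem.List.insertBy, hb, decide_true, if_true]
      by_cases hx : pvKey x = k
      · rw [List.filter_cons]
        simp only [hx, decide_true, if_true, List.head?_cons, gK]
        cases hh : ((y :: ys).filter (fun r => decide (pvKey r = k))).head? with
        | none => simp [hx]
        | some c =>
          have hc : c ∈ (y :: ys).filter (fun r => decide (pvKey r = k)) :=
            List.mem_of_mem_head? hh
          have hc2 : c ∈ y :: ys := List.mem_of_mem_filter hc
          have hle : pvTs c ≤ pvTs y := by
            rcases List.mem_cons.mp hc2 with h | h
            · subst h; rfl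
            · exact hpy c h
          simp [hx, lt_of_le_of_lt hle hb]
      · simp [List.filter_cons, hx, gK]
    · -- x goes further in; y stays the head of both filtered lists (if it matches k)
      simp only [PySem.List.insertBy, decide_eq_true_iff, if_neg hb]
      by_cases hy : pvKey y = k
      · simp [List.filter_cons, hy, gK, hb]
      · simp only [List.filter_cons, hy, decide_false, Bool.false_eq_true, if_false]
        exact ih hpys

theorem sorted_filter_head (k : String × String) (l : List (List (String × String))) :
    ((PySem.List.sorted l (fun r => pvTs r) true).filter (fun r => decide (pvKey r = k))).head?
      = l.foldl (gK k) none := by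
  induction l using List.reverseRecOn with
  | nil => simp [PySem.List.sorted_rev_eq_foldl_insertBy]
  | append_singleton l x ih =>
    have hsort : PySem.List.sorted (l ++ [x]) (fun r => pvTs r) true
        = PySem.List.insertBy (fun a b => decide (pvTs b < pvTs a)) x (PySem.List.sorted l (fun r => pvTs r) true) := by
      rw [PySem.List.sorted_rev_eq_foldl_insertBy, PySem.List.sorted_rev_eq_foldl_insertBy, List.foldl_append]
      rfl
    rw [hsort, List.foldl_append, List.foldl_cons, List.foldl_nil,
      insertBy_filter_head k x _ (PySem.List.sorted_pairwise_rev l (fun r => pvTs r)), ih]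

theorem dicts_agree (l : List (List (String × String))) (k : String × String) :
    (l.foldl pvStepLatest PySem.Dict.empty).get? k
      = ((PySem.List.sorted l (fun r => pvTs r) true).foldl pvStepDedup PySem.Dict.empty).get? k := by
  rw [stepLatest_get?, stepDedup_get?, sorted_filter_head]
  rfl

theorem witness_ok : Dom_build_hot_path_series (pvWitness_build_hot_path_series.1) (pvWitness_build_hot_path_series.2.1) (pvWitness_build_hot_path_series.2.2) ∧ Pre_build_hot_path_series (pvWitness_build_hot_path_series.1) (pvWitness_build_hot_path_series.2.1) (pvWitness_build_hot_path_series.2.2) := by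
  decide

-- ===== VERDICT (by name: the statement is the Claim_ definition above) =====
theorem build_hot_path_series_spec : Claim_equal_build_hot_path_series := by
  intro path_rows scan_dates selected_paths _ _
  unfold Spec_build_hot_path_series build_hot_path_series build_hot_path_series_alt
  have hcell : ∀ scan_date path : String,
      (if (path_rows.foldl pvStepLatest PySem.Dict.empty).contains (scan_date, path) then
        (PySem.Int.ofStr? (pvRowGet (((path_rows.foldl pvStepLatest PySem.Dict.empty).get? (scan_date, path)).getD []) "allocated_bytes")).getD 0
       else 0)
      = pvValueAt ((PySem.List.sorted path_rows (fun r => pvTs r) true).foldl pvStepDedup PySem.Dict.empty) scan_date path := by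
    intro scan_date path
    rw [PySem.Dict.contains_eq_isSome_get?, dicts_agree path_rows (scan_date, path)]
    unfold pvValueAt
    cases ((PySem.List.sorted path_rows (fun r => pvTs r) true).foldl pvStepDedup PySem.Dict.empty).get? (scan_date, path) with
    | none => simp
    | some row => simp
  simp only [hcell]
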